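-- pv_equiv track=rewrite | github.com/kinketu/ProjectEuler-in-Python | complete/problem83.py | matrix_to_graph
-- ===== SOURCE A (Python) =====
-- def matrix_to_graph(m):
--     G = {}
--     max_len = len(m)
--     for x in range(max_len):
--         for y in range(max_len):
--             positions = [(x + 1, y), (x - 1, y), (x, y - 1), (x, y + 1)]
--             for px, py in positions:
--                 if px >= 0 and px < max_len and py >= 0 and py < max_len:
--                     src = '%d_%d' % (x, y)
--                     dst = '%d_%d' % (px, py)
--                     cost = m[px][py]
--                     G.setdefault(src, {})[dst] = cost
--     return G
-- ===== SOURCE B (Python) =====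
-- def matrix_to_graph(m):
--     n = len(m)
--
--     def adjacency(x, y, above, below, lefts, rights):
--         adj = {}
--         if below is not None:
--             adj['%d_%d' % (x + 1, y)] = below[y]
--         if above is not None:
--             adj['%d_%d' % (x - 1, y)] = above[y]
--         if lefts[y] is not None:
--             adj['%d_%d' % (x, y - 1)] = lefts[y]
--         if rights[y] is not None:
--             adj['%d_%d' % (x, y + 1)] = rights[y]
--         return adj
--
--     G = {}
--     for x, (above, row, below) in enumerate(zip([None] + m[:-1], m, m[1:] + [None])):
--         lefts = [None] + list(row[:n - 1])
--         rights = list(row[1:n]) + [None]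
--         for y in range(n):
--             G['%d_%d' % (x, y)] = adjacency(x, y, above, below, lefts, rights)
--     return G
-- ===== Notes on version B (the rewrite author's own statement) =====
-- stated objective: alternative
-- what changed: B replaces A's per-cell probing of four bounds-checked candidate coordinates accumulated via setdefault by a stencil traversal over shifted streams: it zips the matrix with its up- and down-shifted copies and pads each row with left/right-shifted sentinel slices, building every cell's whole adjacency dict in one shot; Pre_ excludes only ragged matrices on which A raises IndexError.
-- intended difference: On 1x1 matrices A returns the empty graph (its setdefault never fires, so the lone cell is dropped) while B returns {'0_0': {}}, the intended graph of the one-node grid. — e.g. on matrix_to_graph([[5]]): A returns [], B returns [("0_0", [])]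
import Mathlib
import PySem

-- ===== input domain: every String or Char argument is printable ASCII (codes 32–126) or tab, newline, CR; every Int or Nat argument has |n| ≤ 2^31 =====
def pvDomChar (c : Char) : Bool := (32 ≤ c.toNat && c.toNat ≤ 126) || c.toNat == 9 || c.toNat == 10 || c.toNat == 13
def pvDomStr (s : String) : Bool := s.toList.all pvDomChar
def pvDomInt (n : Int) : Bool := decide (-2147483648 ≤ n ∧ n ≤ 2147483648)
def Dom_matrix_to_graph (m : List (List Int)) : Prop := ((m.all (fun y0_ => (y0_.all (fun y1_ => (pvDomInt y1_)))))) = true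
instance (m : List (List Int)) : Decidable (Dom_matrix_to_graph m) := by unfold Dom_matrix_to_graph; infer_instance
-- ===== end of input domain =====

-- B replaces A's bounds-checked probing of four candidate neighbours with setdefault accumulation by a
-- stencil traversal over shifted row streams (zip of the matrix with its up/down-shifted copies and
-- left/right-shifted row slices with None sentinels), building each cell's adjacency dict at once;
-- objective: alternative (same O(n^2) cost). On 1x1 matrices A omits the isolated cell; B lists it (D_ below).


-- shared with both Pythons: '%d_%d' % (x, y)
def pvKey (x y : Int) : String := PySem.Int.toStr x ++ "_" ++ PySem.Int.toStr y

-- ===== PORT A =====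
-- G.setdefault(src, {})[dst] = cost  is exactly  G.modify src {} (fun d => d.insert dst cost)
-- (PySem.Dict.modify d k dflt f sets d[k] = f(d.get(k, dflt)), keeping key position).
def matrix_to_graph (m : List (List Int)) : List (String × List (String × Int)) :=
  let maxLen : Int := (m.length : Int)
  let G : PySem.Dict String (PySem.Dict String Int) :=
    (PySem.List.pyRange 0 maxLen 1).foldl (fun G x =>
      (PySem.List.pyRange 0 maxLen 1).foldl (fun G y =>
        [(x + 1, y), (x - 1, y), (x, y - 1), (x, y + 1)].foldl (fun G (p : Int × Int) =>
          if 0 ≤ p.1 ∧ p.1 < maxLen ∧ 0 ≤ p.2 ∧ p.2 < maxLen then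
            match (PySem.List.pyGet? m p.1).bind (fun row => PySem.List.pyGet? row p.2) with
            | some cost =>
                G.modify (pvKey x y) PySem.Dict.empty (fun d => d.insert (pvKey p.1 p.2) cost)
            | none => G  -- IndexError in Python (short row); excluded by Pre_
          else G) G) G) PySem.Dict.empty
  G.items.map (fun e => (e.1, e.2.items))

-- ===== PORT B =====
-- B-side helpers: the 'is not None' tests of Source B's adjacency(): a missing (None) neighbour
-- contributes nothing, a present one contributes its value at column y.
def pvVert (key : String) (o : Option (List Int)) (y : Int) (d : PySem.Dict String Int) :
    PySem.Dict String Int :=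
  match o with
  | some bl =>
      match PySem.List.pyGet? bl y with
      | some c => d.insert key c
      | none => d  -- IndexError in Python (short row); excluded by Pre_
  | none => d

def pvHoriz (key : String) (o : Option (Option Int)) (d : PySem.Dict String Int) :
    PySem.Dict String Int :=
  match o with
  | some (some c) => d.insert key c
  | some none => d
  | none => d  -- IndexError in Python (short row); excluded by Pre_

-- Source B's adjacency(x, y, above, below, lefts, rights): one whole cell dict, built at once
def pvAdjB (x y : Int) (above below : Option (List Int)) (lefts rights : List (Option Int)) :
    PySem.Dict String Int :=
  pvHoriz (pvKey x (y + 1)) (PySem.List.pyGet? rights y)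
    (pvHoriz (pvKey x (y - 1)) (PySem.List.pyGet? lefts y)
      (pvVert (pvKey (x - 1) y) above y
        (pvVert (pvKey (x + 1) y) below y PySem.Dict.empty)))

-- Source B: for x, (above, row, below) in enumerate(zip([None] + m[:-1], m, m[1:] + [None])): …
def matrix_to_graph_alt (m : List (List Int)) : List (String × List (String × Int)) :=
  let n : Int := (m.length : Int)
  let aboves : List (Option (List Int)) := none :: (PySem.List.slice m none (some (-1))).map some
  let belows : List (Option (List Int)) := (PySem.List.slice m (some 1) none).map some ++ [none]
  let G : PySem.Dict String (PySem.Dict String Int) :=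
    (PySem.List.enumerate (aboves.zip (m.zip belows))).foldl
      (fun G (e : Int × (Option (List Int) × (List Int × Option (List Int)))) =>
        let x : Int := e.1
        let above := e.2.1
        let row := e.2.2.1
        let below := e.2.2.2
        let lefts : List (Option Int) := none :: (PySem.List.slice row none (some (n - 1))).map some
        let rights : List (Option Int) := (PySem.List.slice row (some 1) (some n)).map some ++ [none]
        (PySem.List.pyRange 0 n 1).foldl (fun G y =>
          G.insert (pvKey x y) (pvAdjB x y above below lefts rights)) G) PySem.Dict.empty
  G.items.map (fun e => (e.1, e.2.items))

-- ===== PRECONDITION & SPEC =====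
-- Pre_ excludes exactly the inputs where Python A raises IndexError: a matrix with 2 ≤ len(m)
-- whose some row is shorter than len(m) (A indexes every cell of an n×n square).
def Pre_matrix_to_graph (m : List (List Int)) : Prop :=
  m.length ≤ 1 ∨ ∀ row ∈ m, m.length ≤ row.length
instance (m : List (List Int)) : Decidable (Pre_matrix_to_graph m) := by
  unfold Pre_matrix_to_graph; infer_instance

def pvWitness_matrix_to_graph : List (List Int) := [[1, 2], [3, 4]]

-- On 1×1 matrices A returns the empty graph (its setdefault never fires, so the single cell is
-- dropped), while B lists the isolated cell with an empty adjacency dict — the intended graph of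
-- the one-node grid.
def D_matrix_to_graph (m : List (List Int)) : Prop := m.length = 1
instance (m : List (List Int)) : Decidable (D_matrix_to_graph m) := by
  unfold D_matrix_to_graph; infer_instance

def Spec_matrix_to_graph (m : List (List Int)) (out : List (String × List (String × Int))) : Prop := ¬ D_matrix_to_graph m → out = matrix_to_graph_alt m
instance (m : List (List Int)) (out : List (String × List (String × Int))) : Decidable (Spec_matrix_to_graph m out) := by unfold Spec_matrix_to_graph; infer_instance

def pvDiffWitness_matrix_to_graph : List (List Int) := [[5]]
def pvDiffWitnessOut_matrix_to_graph : (List (String × List (String × Int))) × (List (String × List (String × Int))) := ([], [("0_0", [])])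

-- ===== CLAIM (what is proved, stated in full; the proofs are below) =====
def Claim_unchanged_matrix_to_graph : Prop := ∀ (m : List (List Int)), Dom_matrix_to_graph m → Pre_matrix_to_graph m → Spec_matrix_to_graph m (matrix_to_graph m)
def Claim_changed_matrix_to_graph : Prop := Dom_matrix_to_graph (pvDiffWitness_matrix_to_graph) ∧ Pre_matrix_to_graph (pvDiffWitness_matrix_to_graph) ∧ D_matrix_to_graph (pvDiffWitness_matrix_to_graph) ∧ matrix_to_graph (pvDiffWitness_matrix_to_graph) = pvDiffWitnessOut_matrix_to_graph.1 ∧ matrix_to_graph_alt (pvDiffWitness_matrix_to_graph) = pvDiffWitnessOut_matrix_to_graph.2 ∧ pvDiffWitnessOut_matrix_to_graph.1 ≠ pvDiffWitnessOut_matrix_to_graph.2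
def Claim_exact_matrix_to_graph : Prop := ∀ (m : List (List Int)), Dom_matrix_to_graph m → Pre_matrix_to_graph m → D_matrix_to_graph m → matrix_to_graph m ≠ matrix_to_graph_alt m

-- ===== LEMMAS AND PROOFS =====

-- ===== proof helpers: pvKey injectivity on nonnegative coordinates =====
theorem pvToDigitsCore_acc (b : Nat) : ∀ (f n : Nat) (acc : List Char),
    Nat.toDigitsCore b f n acc = Nat.toDigitsCore b f n [] ++ acc := by
  intro f
  induction f with
  | zero => intro n acc; simp [Nat.toDigitsCore]
  | succ f ih =>
    intro n acc
    simp only [Nat.toDigitsCore]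
    by_cases h : n / b = 0
    · simp [h]
    · simp only [h, if_false]
      rw [ih (n / b) (Nat.digitChar (n % b) :: acc), ih (n / b) [Nat.digitChar (n % b)]]
      simp

theorem pvToDigitsCore_eq_digits : ∀ (f n : Nat), 0 < n → n < 10 ^ f →
    Nat.toDigitsCore 10 f n [] = ((Nat.digits 10 n).map Nat.digitChar).reverse := by
  intro f
  induction f with
  | zero => intro n h1 h2; omega
  | succ f ih =>
    intro n h1 h2
    simp only [Nat.toDigitsCore]
    rw [Nat.digits_def' (by norm_num : 1 < 10) h1]
    by_cases h : n / 10 = 0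
    · simp [h]
    · simp only [h, if_false]
      rw [pvToDigitsCore_acc, ih (n / 10) (by omega) (by
        have : n < 10 ^ f * 10 := by rw [← pow_succ]; exact h2
        omega)]
      simp

theorem pvToDigits10_eq (n : Nat) (hn : 0 < n) :
    Nat.toDigits 10 n = ((Nat.digits 10 n).map Nat.digitChar).reverse := by
  unfold Nat.toDigits
  exact pvToDigitsCore_eq_digits (n + 1) n hn (by
    calc n < 10 ^ n := Nat.lt_pow_self (by norm_num)
      _ ≤ 10 ^ (n + 1) := Nat.pow_le_pow_right (by norm_num) (by omega))

theorem pvDigitChar_inj {a b : Nat} (ha : a < 10) (hb : b < 10)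
    (h : Nat.digitChar a = Nat.digitChar b) : a = b := by
  interval_cases a <;> interval_cases b <;> simp_all [Nat.digitChar]

theorem pvMapDigitChar_inj : ∀ (l1 l2 : List Nat), (∀ x ∈ l1, x < 10) → (∀ x ∈ l2, x < 10) →
    l1.map Nat.digitChar = l2.map Nat.digitChar → l1 = l2 := by
  intro l1
  induction l1 with
  | nil => intro l2 _ _ h; cases l2 <;> simp_all
  | cons a tl ih =>
    intro l2 h1 h2 h
    cases l2 with
    | nil => simp at h
    | cons b tl2 =>
      simp only [List.map_cons, List.cons.injEq] at h
      have hab : a = b := pvDigitChar_inj (h1 a (by simp)) (h2 b (by simp)) h.1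
      have := ih tl2 (fun x hx => h1 x (by simp [hx])) (fun x hx => h2 x (by simp [hx])) h.2
      simp [hab, this]

theorem pvNotZeroStr (n : Nat) (hn : 0 < n) : Nat.toDigits 10 n ≠ ['0'] := by
  intro h
  rw [pvToDigits10_eq n hn] at h
  have h2 : (Nat.digits 10 n).map Nat.digitChar = ['0'] := by
    have := congrArg List.reverse h
    simpa using this
  have : Nat.digits 10 n = [0] := by
    have := pvMapDigitChar_inj (Nat.digits 10 n) [0]
      (fun x hx => Nat.digits_lt_base (by norm_num) hx) (by simp) (by simpa using h2)
    exact this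
  have := Nat.ofDigits_digits 10 n
  rw [this.symm, ‹Nat.digits 10 n = [0]›] at hn
  simp [Nat.ofDigits] at hn

theorem pvToDigits10_inj {a b : Nat} (h : Nat.toDigits 10 a = Nat.toDigits 10 b) : a = b := by
  have z : Nat.toDigits 10 0 = ['0'] := by decide
  rcases Nat.eq_zero_or_pos a with ha | ha
  · rcases Nat.eq_zero_or_pos b with hb | hb
    · omega
    · exact absurd h.symm (by rw [ha, z]; exact pvNotZeroStr b hb)
  · rcases Nat.eq_zero_or_pos b with hb | hb
    · exact absurd h (by rw [hb, z]; exact pvNotZeroStr a ha)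
    · rw [pvToDigits10_eq a ha, pvToDigits10_eq b hb] at h
      have h2 : (Nat.digits 10 a).map Nat.digitChar = (Nat.digits 10 b).map Nat.digitChar := by
        have := congrArg List.reverse h
        simpa using this
      exact Nat.digits_inj_iff.mp (pvMapDigitChar_inj _ _
        (fun x hx => Nat.digits_lt_base (by norm_num) hx)
        (fun x hx => Nat.digits_lt_base (by norm_num) hx) h2)

theorem pvNoUnderscore (n : Nat) : '_' ∉ Nat.toDigits 10 n := by
  rcases Nat.eq_zero_or_pos n with h | h
  · subst h; decide
  · rw [pvToDigits10_eq n h]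
    intro hmem
    simp only [List.mem_reverse, List.mem_map] at hmem
    obtain ⟨d, hd, hdc⟩ := hmem
    have : d < 10 := Nat.digits_lt_base (by norm_num) hd
    interval_cases d <;> simp_all [Nat.digitChar]

theorem pvSplitUnderscore : ∀ (l1 l1' : List Char) (l2 l2' : List Char),
    '_' ∉ l1 → '_' ∉ l1' → l1 ++ '_' :: l2 = l1' ++ '_' :: l2' → l1 = l1' ∧ l2 = l2' := by
  intro l1
  induction l1 with
  | nil =>
    intro l1' l2 l2' _ h1' h
    cases l1' with
    | nil => simpa using h
    | cons a tl => simp at h; simp_all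
  | cons a tl ih =>
    intro l1' l2 l2' h1 h1' h
    cases l1' with
    | nil => simp at h; simp_all
    | cons b tl' =>
      simp only [List.cons_append, List.cons.injEq] at h
      obtain ⟨rfl, h2⟩ := h
      have := ih tl' l2 l2' (fun hm => h1 (by simp [hm])) (fun hm => h1' (by simp [hm])) h2
      simp_all

theorem pvToChars_nonneg (x : Int) (hx : 0 ≤ x) :
    PySem.Int.toChars x = Nat.toDigits 10 x.toNat := by
  unfold PySem.Int.toChars
  rw [if_neg (by omega)]

theorem pvKey_inj {x y x' y' : Int} (hx : 0 ≤ x) (hy : 0 ≤ y) (hx' : 0 ≤ x') (hy' : 0 ≤ y')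
    (h : pvKey x y = pvKey x' y') : x = x' ∧ y = y' := by
  unfold pvKey at h
  have hl := congrArg String.toList h
  simp only [String.toList_append, PySem.Int.toList_toStr] at hl
  rw [pvToChars_nonneg x hx, pvToChars_nonneg x' hx', pvToChars_nonneg y hy,
    pvToChars_nonneg y' hy'] at hl
  have hu : ("_" : String).toList = ['_'] := by decide
  rw [hu] at hl
  simp only [List.append_assoc, List.singleton_append] at hl
  have := pvSplitUnderscore _ _ _ _ (pvNoUnderscore x.toNat) (pvNoUnderscore x'.toNat) hl
  constructor
  · have := pvToDigits10_inj this.1; omega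
  · have := pvToDigits10_inj this.2; omega

-- ===== proof helpers: dict folds =====

theorem pvModify_insert (G : PySem.Dict String (PySem.Dict String Int)) (src : String)
    (d : PySem.Dict String Int) (f : PySem.Dict String Int → PySem.Dict String Int) :
    (G.insert src d).modify src PySem.Dict.empty f = G.insert src (f d) := by
  unfold PySem.Dict.modify
  rw [PySem.Dict.getD_insert_self, PySem.Dict.insert_insert_self]

theorem pvModify_fresh (G : PySem.Dict String (PySem.Dict String Int)) (src : String)
    (f : PySem.Dict String Int → PySem.Dict String Int) (h : G.contains src = false) :
    G.modify src PySem.Dict.empty f = G.insert src (f PySem.Dict.empty) := by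
  unfold PySem.Dict.modify
  rw [PySem.Dict.getD_of_not_contains _ _ h]

theorem pvFoldModify_ins (C : Int × Int → Prop) [DecidablePred C] (K : Int × Int → String)
    (V : Int × Int → Int) (src : String) :
    ∀ (ps : List (Int × Int)) (G : PySem.Dict String (PySem.Dict String Int))
      (d : PySem.Dict String Int),
    ps.foldl (fun G p => if C p then G.modify src PySem.Dict.empty
        (fun t => t.insert (K p) (V p)) else G) (G.insert src d)
    = G.insert src (ps.foldl (fun t p => if C p then t.insert (K p) (V p) else t) d) := by
  intro ps
  induction ps with
  | nil => intro G d; simp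
  | cons p tl ih =>
    intro G d
    by_cases hc : C p
    · simp only [List.foldl_cons, if_pos hc, pvModify_insert]
      exact ih G (d.insert (K p) (V p))
    · simp only [List.foldl_cons, if_neg hc]
      exact ih G d

theorem pvFoldModify (C : Int × Int → Prop) [DecidablePred C] (K : Int × Int → String)
    (V : Int × Int → Int) (src : String) :
    ∀ (ps : List (Int × Int)) (G : PySem.Dict String (PySem.Dict String Int)),
    G.contains src = false →
    ps.foldl (fun G p => if C p then G.modify src PySem.Dict.empty
        (fun t => t.insert (K p) (V p)) else G) G
    = if ps.all (fun p => !decide (C p)) then G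
      else G.insert src (ps.foldl (fun t p => if C p then t.insert (K p) (V p) else t)
        PySem.Dict.empty) := by
  intro ps
  induction ps with
  | nil => intro G h; simp
  | cons p tl ih =>
    intro G h
    by_cases hc : C p
    · simp only [List.foldl_cons, if_pos hc, pvModify_fresh G src _ h, List.all_cons]
      rw [pvFoldModify_ins]
      simp [hc]
    · simp only [List.foldl_cons, if_neg hc, List.all_cons]
      rw [ih G h, decide_eq_false hc]
      simp only [Bool.not_false, Bool.true_and]

theorem pvFoldFresh {β : Type} (step : PySem.Dict String (PySem.Dict String Int) → β →
      PySem.Dict String (PySem.Dict String Int)) (K : β → String)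
    (V : β → PySem.Dict String Int) :
    ∀ (l : List β) (G : PySem.Dict String (PySem.Dict String Int)),
    (∀ (G' : PySem.Dict String (PySem.Dict String Int)) (c : β), c ∈ l →
        G'.contains (K c) = false → step G' c = G'.insert (K c) (V c)) →
    (∀ c ∈ l, G.contains (K c) = false) →
    (l.map K).Nodup →
    (l.foldl step G).items = G.items ++ l.map (fun c => (K c, V c)) := by
  intro l
  induction l with
  | nil => intro G _ _ _; simp
  | cons c tl ih =>
    intro G hstep hfresh hnd
    simp only [List.map_cons, List.nodup_cons] at hnd
    have h1 : step G c = G.insert (K c) (V c) := hstep G c (by simp) (hfresh c (by simp))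
    simp only [List.foldl_cons, h1]
    rw [ih (G.insert (K c) (V c)) (fun G' c' hc' => hstep G' c' (by simp [hc']))
        (fun c' hc' => by
          rw [PySem.Dict.contains_insert]
          have hne : K c' ≠ K c := by
            intro he
            exact hnd.1 (he ▸ List.mem_map_of_mem hc')
          simp [hne, hfresh c' (by simp [hc'])])
        hnd.2]
    rw [PySem.Dict.items_insert_of_not_contains _ _ (hfresh c (by simp))]
    simp

-- ===== proof helpers: cells and lookups =====

def pvCells (n : Int) : List (Int × Int) :=
  (PySem.List.pyRange 0 n 1).flatMap (fun x => (PySem.List.pyRange 0 n 1).map (fun y => (x, y)))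

def pvVal (m : List (List Int)) (p : Int × Int) : Int :=
  ((PySem.List.pyGet? m p.1).bind (fun row => PySem.List.pyGet? row p.2)).getD 0

theorem pvMemCells (n : Int) (c : Int × Int) :
    c ∈ pvCells n ↔ (0 ≤ c.1 ∧ c.1 < n ∧ 0 ≤ c.2 ∧ c.2 < n) := by
  unfold pvCells
  rw [List.mem_flatMap]
  constructor
  · rintro ⟨x, hx, hc⟩
    rw [List.mem_map] at hc
    obtain ⟨y, hy, rfl⟩ := hc
    rw [PySem.List.mem_pyRange_one] at hx hy
    exact ⟨hx.1, hx.2, hy.1, hy.2⟩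
  · intro h
    refine ⟨c.1, PySem.List.mem_pyRange_one.mpr ⟨h.1, h.2.1⟩, ?_⟩
    rw [List.mem_map]
    exact ⟨c.2, PySem.List.mem_pyRange_one.mpr ⟨h.2.2.1, h.2.2.2⟩, rfl⟩

theorem pvNestedFold {γ : Type} (n : Int) (f : γ → Int → Int → γ) (g : γ → Int × Int → γ)
    (h : ∀ a x y, f a x y = g a (x, y)) (init : γ) :
    (PySem.List.pyRange 0 n 1).foldl (fun a x =>
      (PySem.List.pyRange 0 n 1).foldl (fun a y => f a x y) a) init
    = (pvCells n).foldl g init := by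
  unfold pvCells
  rw [List.foldl_flatMap]
  refine PySem.List.foldl_congr_mem _ _ _ _ ?_
  intro acc x _
  rw [List.foldl_map]
  exact PySem.List.foldl_congr_mem _ _ _ _ (fun a y _ => h a x y)

theorem pvNodupKeys (n : Int) : ((pvCells n).map (fun c => pvKey c.1 c.2)).Nodup := by
  unfold pvCells
  rw [List.map_flatMap, List.nodup_flatMap]
  constructor
  · intro x hx
    have hx0 : 0 ≤ x := (PySem.List.mem_pyRange_one.mp hx).1
    rw [List.map_map]
    refine (List.nodup_map_iff_inj_on (PySem.List.nodup_pyRange_one 0 n)).mpr ?_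
    intro y hy y' hy' he
    exact (pvKey_inj hx0 (PySem.List.mem_pyRange_one.mp hy).1 hx0
      (PySem.List.mem_pyRange_one.mp hy').1 he).2
  · refine List.Pairwise.imp_of_mem ?_ (PySem.List.pairwise_lt_pyRange_one 0 n)
    intro x x' hx hx' hlt s hs hs'
    simp only [List.map_map, List.mem_map, Function.comp] at hs hs'
    obtain ⟨y, hy, rfl⟩ := hs
    obtain ⟨y', hy', he⟩ := hs'
    have h := pvKey_inj (PySem.List.mem_pyRange_one.mp hx').1
      (PySem.List.mem_pyRange_one.mp hy').1 (PySem.List.mem_pyRange_one.mp hx).1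
      (PySem.List.mem_pyRange_one.mp hy).1 he
    omega

theorem pvGetSome {α : Type} (xs : List α) (i : Int) (d : α) (h0 : 0 ≤ i)
    (h1 : i < (xs.length : Int)) :
    PySem.List.pyGet? xs i = some (xs.getD i.toNat d) := by
  unfold PySem.List.pyGet? PySem.List.pyIdx?
  rw [if_pos h0, if_pos h1]
  have hm : i.toNat < xs.length := by omega
  simp [List.getElem?_eq_getElem hm]

theorem pvLookup (m : List (List Int)) (hrow : ∀ row ∈ m, m.length ≤ row.length) (p : Int × Int)
    (hp : 0 ≤ p.1 ∧ p.1 < (m.length : Int) ∧ 0 ≤ p.2 ∧ p.2 < (m.length : Int)) :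
    (PySem.List.pyGet? m p.1).bind (fun row => PySem.List.pyGet? row p.2) = some (pvVal m p) := by
  obtain ⟨h1, h2, h3, h4⟩ := hp
  have hm : p.1.toNat < m.length := by omega
  have hrowget : PySem.List.pyGet? m p.1 = some (m.getD p.1.toNat []) := pvGetSome m p.1 [] h1 h2
  have hmem : m.getD p.1.toNat [] ∈ m := by
    rw [List.getD_eq_getElem _ _ hm]; exact List.getElem_mem hm
  have hlen : p.2.toNat < (m.getD p.1.toNat []).length := by
    have := hrow _ hmem; omega
  have hcget : PySem.List.pyGet? (m.getD p.1.toNat []) p.2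
      = some ((m.getD p.1.toNat []).getD p.2.toNat 0) :=
    pvGetSome _ p.2 0 h3 (by omega)
  unfold pvVal
  rw [hrowget]
  rw [Option.bind_some]
  rw [hcget]
  rfl

theorem pvLookup2 (m : List (List Int)) (hrow : ∀ row ∈ m, m.length ≤ row.length) (a b : Int)
    (hp : 0 ≤ a ∧ a < (m.length : Int) ∧ 0 ≤ b ∧ b < (m.length : Int)) :
    (PySem.List.pyGet? m a).bind (fun row => PySem.List.pyGet? row b) = some (pvVal m (a, b)) :=
  pvLookup m hrow (a, b) hp

theorem pvValGetD (m : List (List Int)) (hrow : ∀ row ∈ m, m.length ≤ row.length) (a b : Int)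
    (hp : 0 ≤ a ∧ a < (m.length : Int) ∧ 0 ≤ b ∧ b < (m.length : Int)) :
    pvVal m (a, b) = (m.getD a.toNat []).getD b.toNat 0 := by
  have hm : a.toNat < m.length := by omega
  have hmem : m.getD a.toNat [] ∈ m := by
    rw [List.getD_eq_getElem _ _ hm]; exact List.getElem_mem hm
  have hlen : b.toNat < (m.getD a.toNat []).length := by
    have := hrow _ hmem; omega
  unfold pvVal
  rw [pvGetSome m a [] hp.1 hp.2.1]
  rw [Option.bind_some]
  rw [pvGetSome _ b 0 hp.2.2.1 (by omega)]
  rfl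

theorem pvRowLen (m : List (List Int)) (hrow : ∀ row ∈ m, m.length ≤ row.length) (k : Int)
    (h0 : 0 ≤ k) (h1 : k < (m.length : Int)) :
    (m.length : Int) ≤ ((m.getD k.toNat []).length : Int) := by
  have hm : k.toNat < m.length := by omega
  have hmem : m.getD k.toNat [] ∈ m := by
    rw [List.getD_eq_getElem _ _ hm]; exact List.getElem_mem hm
  have := hrow _ hmem
  omega

-- canonical per-cell adjacency dict (down, up, left, right; values by position)
def pvCanon (m : List (List Int)) (n x y : Int) : PySem.Dict String Int :=
  let d0 : PySem.Dict String Int := PySem.Dict.empty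
  let d1 := if x + 1 < n then d0.insert (pvKey (x + 1) y) (pvVal m (x + 1, y)) else d0
  let d2 := if 0 < x then d1.insert (pvKey (x - 1) y) (pvVal m (x - 1, y)) else d1
  let d3 := if 0 < y then d2.insert (pvKey x (y - 1)) (pvVal m (x, y - 1)) else d2
  if y + 1 < n then d3.insert (pvKey x (y + 1)) (pvVal m (x, y + 1)) else d3

-- A's inner adjacency (per-candidate bounds check over m)
def pvAdj (m : List (List Int)) (n x y : Int) : PySem.Dict String Int :=
  [(x + 1, y), (x - 1, y), (x, y - 1), (x, y + 1)].foldl (fun d (p : Int × Int) =>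
    if 0 ≤ p.1 ∧ p.1 < n ∧ 0 ≤ p.2 ∧ p.2 < n then
      match (PySem.List.pyGet? m p.1).bind (fun row => PySem.List.pyGet? row p.2) with
      | some c => d.insert (pvKey p.1 p.2) c
      | none => d
    else d) PySem.Dict.empty

-- the three shifted row streams, by index
def pvAbove (m : List (List Int)) (x : Int) : Option (List Int) :=
  if x = 0 then none else some (m.getD (x - 1).toNat [])
def pvRowF (m : List (List Int)) (x : Int) : List Int := m.getD x.toNat []
def pvBelow (m : List (List Int)) (x : Int) : Option (List Int) :=
  if x = (m.length : Int) - 1 then none else some (m.getD (x + 1).toNat [])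
def pvLefts (m : List (List Int)) (x : Int) : List (Option Int) :=
  none :: (PySem.List.slice (pvRowF m x) none (some ((m.length : Int) - 1))).map some
def pvRights (m : List (List Int)) (x : Int) : List (Option Int) :=
  (PySem.List.slice (pvRowF m x) (some 1) (some (m.length : Int))).map some ++ [none]

theorem pvEnum_zip {α : Type} (l : List α) (s : Int) :
    PySem.List.enumerate l s = (PySem.List.pyRange s (s + (l.length : Int)) 1).zip l := by
  induction l generalizing s with
  | nil => simp [PySem.List.enumerate_nil, PySem.List.pyRange_one_eq_nil]
  | cons a tl ih =>
    have hb : s < s + ((a :: tl).length : Int) := by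
      simp only [List.length_cons]; push_cast; omega
    have hlen : (s + 1) + (tl.length : Int) = s + ((a :: tl).length : Int) := by
      simp only [List.length_cons]; push_cast; omega
    rw [PySem.List.enumerate_cons, ih (s + 1), hlen, PySem.List.pyRange_one_cons hb,
      List.zip_cons_cons]

theorem pvTriples (m : List (List Int)) :
    PySem.List.enumerate
      ((none :: (PySem.List.slice m none (some (-1))).map some).zip
        (m.zip ((PySem.List.slice m (some 1) none).map some ++ [none])))
    = (PySem.List.pyRange 0 (m.length : Int) 1).map
        (fun x => (x, (pvAbove m x, (pvRowF m x, pvBelow m x)))) := by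
  by_cases hm0 : m.length = 0
  · have : m = [] := by cases m with
      | nil => rfl
      | cons a tl => simp at hm0
    subst this
    decide
  · have hm : 1 ≤ m.length := by omega
    rw [PySem.List.slice_to_neg_one, PySem.List.slice_from_one]
    have hlA : (none :: m.dropLast.map some).length = m.length := by
      simp only [List.length_cons, List.length_map, List.length_dropLast]
      omega
    have hlB : (m.tail.map some ++ [none]).length = m.length := by
      simp only [List.length_append, List.length_map, List.length_tail, List.length_cons, List.length_nil]
      omega
    rw [pvEnum_zip]
    apply List.ext_getElem
    · simp only [List.length_zip, List.length_map, PySem.List.length_pyRange_one, hlA, hlB]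
      omega
    · intro i hi1 hi2
      have hi : i < m.length := by
        simp only [List.length_zip, PySem.List.length_pyRange_one, hlA, hlB] at hi1
        omega
      rw [List.getElem_zip, List.getElem_map, List.getElem_zip, List.getElem_zip]
      rw [PySem.List.getElem_pyRange_one, PySem.List.getElem_pyRange_one]
      simp only [Prod.mk.injEq, zero_add]
      refine ⟨by trivial, ?_, ?_, ?_⟩
      · -- above component
        unfold pvAbove
        rcases Nat.eq_zero_or_pos i with rfl | hpos
        · simp
        · rw [if_neg (by omega : ¬ ((i : Int) = 0))]
          have hilt : i - 1 < m.dropLast.length := by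
            simp only [List.length_dropLast]; omega
          have hstep : (none :: m.dropLast.map some)[i]'(by
              simp only [List.length_cons, List.length_map]; omega)
              = (m.dropLast.map some)[i - 1]'(by simpa using hilt) := by
            rcases i with _ | j
            · omega
            · simp
          rw [hstep, List.getElem_map, List.getElem_dropLast]
          rw [show ((i : Int) - 1).toNat = i - 1 from by omega,
            List.getD_eq_getElem _ _ (by omega : i - 1 < m.length)]
      · -- row component
        unfold pvRowF
        rw [show ((i : Int)).toNat = i from by omega,
          List.getD_eq_getElem _ _ hi]
      · -- below component
        unfold pvBelow
        by_cases hlast : i = m.length - 1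
        · rw [if_pos (by omega)]
          have hstep : (m.tail.map some ++ [none])[i]'(by rw [hlB]; omega) = none := by
            rw [List.getElem_append_right (by
              simp only [List.length_map, List.length_tail]; omega)]
            simp
          rw [hstep]
        · rw [if_neg (by omega)]
          have hit : i < m.tail.length := by simp only [List.length_tail]; omega
          have hstep : (m.tail.map some ++ [none])[i]'(by rw [hlB]; omega)
              = some (m.tail[i]'hit) := by
            rw [List.getElem_append_left (by simpa using hit)]
            simp
          rw [hstep, List.getElem_tail]
          rw [show ((i : Int) + 1).toNat = i + 1 from by omega,
            List.getD_eq_getElem _ _ (by omega : i + 1 < m.length)]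

-- per-cell step of port A collapses to the canonical adjacency dict
theorem pvAdj_canon (m : List (List Int)) (hrow : ∀ row ∈ m, m.length ≤ row.length) (x y : Int)
    (hx0 : 0 ≤ x) (hx1 : x < (m.length : Int)) (hy0 : 0 ≤ y) (hy1 : y < (m.length : Int)) :
    pvAdj m (m.length : Int) x y = pvCanon m (m.length : Int) x y := by
  have s1 : ∀ d : PySem.Dict String Int,
      (if 0 ≤ x + 1 ∧ x + 1 < (m.length : Int) ∧ 0 ≤ y ∧ y < (m.length : Int) then
        match (PySem.List.pyGet? m (x + 1)).bind (fun row => PySem.List.pyGet? row y) with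
        | some c => d.insert (pvKey (x + 1) y) c
        | none => d
      else d)
      = if x + 1 < (m.length : Int) then d.insert (pvKey (x + 1) y) (pvVal m (x + 1, y)) else d := by
    intro d
    by_cases h : x + 1 < (m.length : Int)
    · rw [if_pos ⟨by omega, h, hy0, hy1⟩, pvLookup2 m hrow (x + 1) y ⟨by omega, h, hy0, hy1⟩,
        if_pos h]
    · rw [if_neg (by omega), if_neg h]
  have s2 : ∀ d : PySem.Dict String Int,
      (if 0 ≤ x - 1 ∧ x - 1 < (m.length : Int) ∧ 0 ≤ y ∧ y < (m.length : Int) then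
        match (PySem.List.pyGet? m (x - 1)).bind (fun row => PySem.List.pyGet? row y) with
        | some c => d.insert (pvKey (x - 1) y) c
        | none => d
      else d)
      = if 0 < x then d.insert (pvKey (x - 1) y) (pvVal m (x - 1, y)) else d := by
    intro d
    by_cases h : 0 < x
    · rw [if_pos ⟨by omega, by omega, hy0, hy1⟩,
        pvLookup2 m hrow (x - 1) y ⟨by omega, by omega, hy0, hy1⟩, if_pos h]
    · rw [if_neg (by omega), if_neg h]
  have s3 : ∀ d : PySem.Dict String Int,
      (if 0 ≤ x ∧ x < (m.length : Int) ∧ 0 ≤ y - 1 ∧ y - 1 < (m.length : Int) then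
        match (PySem.List.pyGet? m x).bind (fun row => PySem.List.pyGet? row (y - 1)) with
        | some c => d.insert (pvKey x (y - 1)) c
        | none => d
      else d)
      = if 0 < y then d.insert (pvKey x (y - 1)) (pvVal m (x, y - 1)) else d := by
    intro d
    by_cases h : 0 < y
    · rw [if_pos ⟨hx0, hx1, by omega, by omega⟩,
        pvLookup2 m hrow x (y - 1) ⟨hx0, hx1, by omega, by omega⟩, if_pos h]
    · rw [if_neg (by omega), if_neg h]
  have s4 : ∀ d : PySem.Dict String Int,
      (if 0 ≤ x ∧ x < (m.length : Int) ∧ 0 ≤ y + 1 ∧ y + 1 < (m.length : Int) then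
        match (PySem.List.pyGet? m x).bind (fun row => PySem.List.pyGet? row (y + 1)) with
        | some c => d.insert (pvKey x (y + 1)) c
        | none => d
      else d)
      = if y + 1 < (m.length : Int) then d.insert (pvKey x (y + 1)) (pvVal m (x, y + 1)) else d := by
    intro d
    by_cases h : y + 1 < (m.length : Int)
    · rw [if_pos ⟨hx0, hx1, by omega, h⟩,
        pvLookup2 m hrow x (y + 1) ⟨hx0, hx1, by omega, h⟩, if_pos h]
    · rw [if_neg (by omega), if_neg h]
  unfold pvAdj pvCanon
  simp only [List.foldl_cons, List.foldl_nil]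
  rw [s1, s2, s3, s4]

-- per-cell step of port B builds the same canonical adjacency dict
theorem pvAdjB_canon (m : List (List Int)) (hn : 2 ≤ m.length)
    (hrow : ∀ row ∈ m, m.length ≤ row.length) (x y : Int)
    (hx0 : 0 ≤ x) (hx1 : x < (m.length : Int)) (hy0 : 0 ≤ y) (hy1 : y < (m.length : Int)) :
    pvAdjB x y (pvAbove m x) (pvBelow m x) (pvLefts m x) (pvRights m x)
      = pvCanon m (m.length : Int) x y := by
  have hrl : (m.length : Int) ≤ ((pvRowF m x).length : Int) := pvRowLen m hrow x hx0 hx1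
  have hv1 : ∀ d : PySem.Dict String Int,
      pvVert (pvKey (x + 1) y) (pvBelow m x) y d
      = if x + 1 < (m.length : Int) then d.insert (pvKey (x + 1) y) (pvVal m (x + 1, y)) else d := by
    intro d
    by_cases h : x + 1 < (m.length : Int)
    · have hb : pvBelow m x = some (m.getD (x + 1).toNat []) := by
        unfold pvBelow; rw [if_neg (by omega)]
      have hrl' := pvRowLen m hrow (x + 1) (by omega) h
      rw [hb]
      simp only [pvVert]
      rw [pvGetSome _ y 0 hy0 (by omega), if_pos h,
        pvValGetD m hrow (x + 1) y ⟨by omega, h, hy0, hy1⟩]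
    · have hb : pvBelow m x = none := by
        unfold pvBelow; rw [if_pos (by omega)]
      rw [hb, if_neg h]
      rfl
  have hv2 : ∀ d : PySem.Dict String Int,
      pvVert (pvKey (x - 1) y) (pvAbove m x) y d
      = if 0 < x then d.insert (pvKey (x - 1) y) (pvVal m (x - 1, y)) else d := by
    intro d
    by_cases h : 0 < x
    · have hb : pvAbove m x = some (m.getD (x - 1).toNat []) := by
        unfold pvAbove; rw [if_neg (by omega)]
      have hrl' := pvRowLen m hrow (x - 1) (by omega) (by omega)
      rw [hb]
      simp only [pvVert]
      rw [pvGetSome _ y 0 hy0 (by omega), if_pos h,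
        pvValGetD m hrow (x - 1) y ⟨by omega, by omega, hy0, hy1⟩]
    · have hb : pvAbove m x = none := by
        unfold pvAbove; rw [if_pos (by omega)]
      rw [hb, if_neg h]
      rfl
  have hlefts : PySem.List.slice (pvRowF m x) none (some ((m.length : Int) - 1))
      = (pvRowF m x).take ((m.length : Int) - 1).toNat := by
    rw [PySem.List.slice_to _ (by omega)]
  have hrights : PySem.List.slice (pvRowF m x) (some 1) (some (m.length : Int))
      = ((pvRowF m x).drop 1).take ((m.length : Int).toNat - 1) := by
    rw [PySem.List.slice_toNat _ (by omega) (by omega)]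
    norm_num
  have hh3 : ∀ d : PySem.Dict String Int,
      pvHoriz (pvKey x (y - 1))
        (PySem.List.pyGet?
          (none :: (PySem.List.slice (pvRowF m x) none (some ((m.length : Int) - 1))).map some) y) d
      = if 0 < y then d.insert (pvKey x (y - 1)) (pvVal m (x, y - 1)) else d := by
    intro d
    rw [hlefts]
    have hlen : ((none :: ((pvRowF m x).take ((m.length : Int) - 1).toNat).map some).length : Int)
        = (m.length : Int) := by
      simp only [List.length_cons, List.length_map, List.length_take]
      omega
    rw [pvGetSome _ y none hy0 (by omega)]
    by_cases h : 0 < y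
    · have hys : y.toNat = (y - 1).toNat + 1 := by omega
      have hgd : ((none :: ((pvRowF m x).take ((m.length : Int) - 1).toNat).map some).getD
            y.toNat none)
          = some ((pvRowF m x).getD (y - 1).toNat 0) := by
        rw [hys, List.getD_cons_succ, List.getD_eq_getElem?_getD, List.getElem?_map,
          List.getElem?_take_of_lt (by omega : (y - 1).toNat < ((m.length : Int) - 1).toNat),
          List.getElem?_eq_getElem (by omega : (y - 1).toNat < (pvRowF m x).length),
          List.getD_eq_getElem _ _ (by omega : (y - 1).toNat < (pvRowF m x).length)]
        rfl
      rw [hgd, if_pos h, pvValGetD m hrow x (y - 1) ⟨hx0, hx1, by omega, by omega⟩]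
      rfl
    · have hy0' : y.toNat = 0 := by omega
      rw [hy0', List.getD_cons_zero, if_neg h]
      rfl
  have hh4 : ∀ d : PySem.Dict String Int,
      pvHoriz (pvKey x (y + 1))
        (PySem.List.pyGet?
          ((PySem.List.slice (pvRowF m x) (some 1) (some (m.length : Int))).map some ++ [none]) y) d
      = if y + 1 < (m.length : Int) then d.insert (pvKey x (y + 1)) (pvVal m (x, y + 1)) else d := by
    intro d
    rw [hrights]
    have hlen : (((((pvRowF m x).drop 1).take ((m.length : Int).toNat - 1)).map some ++ [none]).length : Int)
        = (m.length : Int) := by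
      simp only [List.length_append, List.length_map, List.length_take, List.length_drop,
        List.length_cons, List.length_nil]
      omega
    rw [pvGetSome _ y none hy0 (by omega)]
    by_cases h : y + 1 < (m.length : Int)
    · have hk : y.toNat < ((((pvRowF m x).drop 1).take ((m.length : Int).toNat - 1)).map some).length := by
        simp only [List.length_map, List.length_take, List.length_drop]
        omega
      have hgd : (((((pvRowF m x).drop 1).take ((m.length : Int).toNat - 1)).map some ++ [none]).getD
            y.toNat none)
          = some ((pvRowF m x).getD (1 + y.toNat) 0) := by
        rw [List.getD_eq_getElem?_getD, List.getElem?_append_left hk, List.getElem?_map,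
          List.getElem?_take_of_lt (by
            simp only [List.length_map, List.length_take, List.length_drop] at hk
            omega),
          List.getElem?_drop,
          List.getElem?_eq_getElem (by omega : 1 + y.toNat < (pvRowF m x).length),
          List.getD_eq_getElem _ _ (by omega : 1 + y.toNat < (pvRowF m x).length)]
        rfl
      rw [hgd, if_pos h, pvValGetD m hrow x (y + 1) ⟨hx0, hx1, by omega, h⟩,
        show (y + 1).toNat = 1 + y.toNat from by omega]
      rfl
    · have hidx : y.toNat = ((((pvRowF m x).drop 1).take ((m.length : Int).toNat - 1)).map some).length := by
        simp only [List.length_map, List.length_take, List.length_drop]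
        omega
      have hgd : (((((pvRowF m x).drop 1).take ((m.length : Int).toNat - 1)).map some ++ [none]).getD
            y.toNat none) = (none : Option Int) := by
        rw [List.getD_eq_getElem _ _ (by
          simp only [List.length_append, List.length_map, List.length_take, List.length_drop,
            List.length_cons, List.length_nil]
          omega)]
        rw [List.getElem_append_right (by omega)]
        simp
      rw [hgd, if_neg h]
      rfl
  simp only [pvAdjB, pvLefts, pvRights]
  rw [hv1, hv2, hh3, hh4]
  rfl

-- per-cell step of port A collapses to one insert of the whole adjacency dict
theorem pvStepA (m : List (List Int)) (hn : 2 ≤ m.length)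
    (hrow : ∀ row ∈ m, m.length ≤ row.length)
    (G : PySem.Dict String (PySem.Dict String Int)) (c : Int × Int)
    (hc : c ∈ pvCells (m.length : Int))
    (hfresh : G.contains (pvKey c.1 c.2) = false) :
    [(c.1 + 1, c.2), (c.1 - 1, c.2), (c.1, c.2 - 1), (c.1, c.2 + 1)].foldl
      (fun G (p : Int × Int) =>
        if 0 ≤ p.1 ∧ p.1 < (m.length : Int) ∧ 0 ≤ p.2 ∧ p.2 < (m.length : Int) then
          match (PySem.List.pyGet? m p.1).bind (fun row => PySem.List.pyGet? row p.2) with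
          | some cost =>
              G.modify (pvKey c.1 c.2) PySem.Dict.empty (fun d => d.insert (pvKey p.1 p.2) cost)
          | none => G
        else G) G
    = G.insert (pvKey c.1 c.2) (pvAdj m (m.length : Int) c.1 c.2) := by
  rw [pvMemCells] at hc
  have hcong : ∀ (acc : PySem.Dict String (PySem.Dict String Int)) (p : Int × Int),
      p ∈ [(c.1 + 1, c.2), (c.1 - 1, c.2), (c.1, c.2 - 1), (c.1, c.2 + 1)] →
      (if 0 ≤ p.1 ∧ p.1 < (m.length : Int) ∧ 0 ≤ p.2 ∧ p.2 < (m.length : Int) then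
          match (PySem.List.pyGet? m p.1).bind (fun row => PySem.List.pyGet? row p.2) with
          | some cost =>
              acc.modify (pvKey c.1 c.2) PySem.Dict.empty (fun d => d.insert (pvKey p.1 p.2) cost)
          | none => acc
        else acc)
      = (if 0 ≤ p.1 ∧ p.1 < (m.length : Int) ∧ 0 ≤ p.2 ∧ p.2 < (m.length : Int) then
          acc.modify (pvKey c.1 c.2) PySem.Dict.empty
            (fun d => d.insert (pvKey p.1 p.2) (pvVal m p))
        else acc) := by
    intro acc p _
    by_cases hcp : 0 ≤ p.1 ∧ p.1 < (m.length : Int) ∧ 0 ≤ p.2 ∧ p.2 < (m.length : Int)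
    · rw [if_pos hcp, if_pos hcp, pvLookup m hrow p hcp]
    · rw [if_neg hcp, if_neg hcp]
  rw [PySem.List.foldl_congr_mem _ _ _ _ hcong]
  rw [pvFoldModify (fun p => 0 ≤ p.1 ∧ p.1 < (m.length : Int) ∧ 0 ≤ p.2 ∧ p.2 < (m.length : Int))
    (fun p => pvKey p.1 p.2) (pvVal m) (pvKey c.1 c.2) _ G hfresh]
  rw [if_neg ?_]
  · congr 1
    unfold pvAdj
    refine (PySem.List.foldl_congr_mem _ _ _ _ ?_).symm
    intro acc p _
    by_cases hcp : 0 ≤ p.1 ∧ p.1 < (m.length : Int) ∧ 0 ≤ p.2 ∧ p.2 < (m.length : Int)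
    · rw [if_pos hcp, if_pos hcp, pvLookup m hrow p hcp]
    · rw [if_neg hcp, if_neg hcp]
  · rw [Bool.not_eq_true, List.all_eq_false]
    by_cases hx : c.1 + 1 < (m.length : Int)
    · exact ⟨(c.1 + 1, c.2), by simp, by simp; omega⟩
    · exact ⟨(c.1 - 1, c.2), by simp, by simp; omega⟩

theorem pv_main_eq (m : List (List Int)) (hpre : Pre_matrix_to_graph m)
    (hD : m.length ≠ 1) : matrix_to_graph m = matrix_to_graph_alt m := by
  by_cases hn1 : m.length ≤ 1
  · have h0 : m = [] := by
      cases m with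
      | nil => rfl
      | cons a tl => simp only [List.length_cons] at hn1 hD; omega
    subst h0
    rfl
  · have hn : 2 ≤ m.length := by omega
    have hrow : ∀ row ∈ m, m.length ≤ row.length := by
      rcases hpre with h | h
      · omega
      · exact h
    have hB : matrix_to_graph_alt m
        = ((PySem.List.pyRange 0 (m.length : Int) 1).foldl (fun G x =>
            (PySem.List.pyRange 0 (m.length : Int) 1).foldl (fun G y =>
              G.insert (pvKey x y)
                (pvAdjB x y (pvAbove m x) (pvBelow m x) (pvLefts m x) (pvRights m x))) G)
            PySem.Dict.empty).items.map (fun e => (e.1, e.2.items)) := by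
      simp only [matrix_to_graph_alt]
      rw [pvTriples m, List.foldl_map]
      exact rfl
    rw [hB]
    simp only [matrix_to_graph]
    rw [pvNestedFold (γ := PySem.Dict String (PySem.Dict String Int)) (m.length : Int)
        (fun G x y =>
          [(x + 1, y), (x - 1, y), (x, y - 1), (x, y + 1)].foldl
            (fun G (p : Int × Int) =>
              if 0 ≤ p.1 ∧ p.1 < (m.length : Int) ∧ 0 ≤ p.2 ∧ p.2 < (m.length : Int) then
                match (PySem.List.pyGet? m p.1).bind (fun row => PySem.List.pyGet? row p.2) with
                | some cost =>
                    G.modify (pvKey x y) PySem.Dict.empty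
                      (fun d => d.insert (pvKey p.1 p.2) cost)
                | none => G
              else G) G)
        (fun G (c : Int × Int) =>
          [(c.1 + 1, c.2), (c.1 - 1, c.2), (c.1, c.2 - 1), (c.1, c.2 + 1)].foldl
            (fun G (p : Int × Int) =>
              if 0 ≤ p.1 ∧ p.1 < (m.length : Int) ∧ 0 ≤ p.2 ∧ p.2 < (m.length : Int) then
                match (PySem.List.pyGet? m p.1).bind (fun row => PySem.List.pyGet? row p.2) with
                | some cost =>
                    G.modify (pvKey c.1 c.2) PySem.Dict.empty
                      (fun d => d.insert (pvKey p.1 p.2) cost)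
                | none => G
              else G) G)
        (fun _ _ _ => rfl),
      pvNestedFold (γ := PySem.Dict String (PySem.Dict String Int)) (m.length : Int)
        (fun G x y =>
          G.insert (pvKey x y)
            (pvAdjB x y (pvAbove m x) (pvBelow m x) (pvLefts m x) (pvRights m x)))
        (fun G (c : Int × Int) =>
          G.insert (pvKey c.1 c.2)
            (pvAdjB c.1 c.2 (pvAbove m c.1) (pvBelow m c.1) (pvLefts m c.1) (pvRights m c.1)))
        (fun _ _ _ => rfl)]
    rw [pvFoldFresh
        (fun G (c : Int × Int) =>
          [(c.1 + 1, c.2), (c.1 - 1, c.2), (c.1, c.2 - 1), (c.1, c.2 + 1)].foldl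
            (fun G (p : Int × Int) =>
              if 0 ≤ p.1 ∧ p.1 < (m.length : Int) ∧ 0 ≤ p.2 ∧ p.2 < (m.length : Int) then
                match (PySem.List.pyGet? m p.1).bind (fun row => PySem.List.pyGet? row p.2) with
                | some cost =>
                    G.modify (pvKey c.1 c.2) PySem.Dict.empty
                      (fun d => d.insert (pvKey p.1 p.2) cost)
                | none => G
              else G) G)
        (fun c => pvKey c.1 c.2) (fun c => pvAdj m (m.length : Int) c.1 c.2)
        (pvCells (m.length : Int)) PySem.Dict.empty
        (fun G' c hc hfresh => pvStepA m hn hrow G' c hc hfresh)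
        (fun c _ => PySem.Dict.contains_empty _)
        (pvNodupKeys (m.length : Int)),
      pvFoldFresh
        (fun G (c : Int × Int) =>
          G.insert (pvKey c.1 c.2)
            (pvAdjB c.1 c.2 (pvAbove m c.1) (pvBelow m c.1) (pvLefts m c.1) (pvRights m c.1)))
        (fun c => pvKey c.1 c.2)
        (fun c => pvAdjB c.1 c.2 (pvAbove m c.1) (pvBelow m c.1) (pvLefts m c.1) (pvRights m c.1))
        (pvCells (m.length : Int)) PySem.Dict.empty
        (fun G' c _ _ => rfl)
        (fun c _ => PySem.Dict.contains_empty _)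
        (pvNodupKeys (m.length : Int))]
    rw [show (PySem.Dict.empty : PySem.Dict String (PySem.Dict String Int)).items = [] from rfl]
    simp only [List.nil_append, List.map_map]
    refine List.map_congr_left ?_
    intro c hc
    have hb := (pvMemCells _ c).mp hc
    simp only [Function.comp]
    rw [pvAdj_canon m hrow c.1 c.2 hb.1 hb.2.1 hb.2.2.1 hb.2.2.2,
      pvAdjB_canon m hn hrow c.1 c.2 hb.1 hb.2.1 hb.2.2.1 hb.2.2.2]

theorem pv_A_one (r : List Int) : matrix_to_graph [r] = [] := by
  simp only [matrix_to_graph, List.length_cons, List.length_nil, zero_add, Nat.cast_one]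
  norm_num [show PySem.List.pyRange 0 1 1 = [0] from by decide, List.foldl]
  rfl

theorem pv_B_one (r : List Int) : matrix_to_graph_alt [r] = [("0_0", [])] := by
  have e1 : PySem.List.slice [r] none (some (-1)) = ([] : List (List Int)) := by
    rw [PySem.List.slice_to_neg_one]; rfl
  have e2 : PySem.List.slice [r] (some 1) none = ([] : List (List Int)) := by
    rw [PySem.List.slice_from_one]; rfl
  have e3 : PySem.List.slice r none (some ((1 : Int) - 1)) = [] := by
    norm_num [PySem.List.slice_to]
  have e4 : PySem.List.slice r (some 1) (some (1 : Int)) = [] := by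
    rw [PySem.List.slice_toNat _ (by norm_num) (by norm_num)]
    simp
  simp only [matrix_to_graph_alt, List.length_cons, List.length_nil, zero_add, Nat.cast_one]
  rw [e1, e2]
  simp only [List.map_nil, List.nil_append, List.zip_cons_cons, List.zip_nil_right,
    PySem.List.enumerate_cons, PySem.List.enumerate_nil,
    show PySem.List.pyRange 0 1 1 = [0] from by decide, List.foldl_cons, List.foldl_nil]
  rw [e3, e4]
  rfl

-- ===== VERDICT (by name: the statement is the Claim_ definition above) =====
theorem matrix_to_graph_spec : Claim_unchanged_matrix_to_graph := by
  intro m _ hpre hD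
  exact pv_main_eq m hpre (fun h1 => hD h1)

theorem matrix_to_graph_changed : Claim_changed_matrix_to_graph := by
  unfold Claim_changed_matrix_to_graph; decide

theorem matrix_to_graph_tight : Claim_exact_matrix_to_graph := by
  intro m _ _ hlen
  match m, hlen with
  | [r], _ => rw [pv_A_one, pv_B_one]; simp
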